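-- pv_equiv track=rewrite | github.com/xiehangyu/Dotfiles | back_up_code_user/History/775251c4/bdmk.py | klrv
-- ===== SOURCE A (Python) =====
-- def klrv(D,alpha,beta,gamma):
--     '''
--     Calculate S1, where S1 is the element which makes the first brackets non zero.
--     '''
--     my_set1=set()
--     my_set2=set()
--     for k in range(D):
--         for l in range(D):
--             if(((2*alpha*k+beta*l)%D==0) and ((beta*k+2*gamma*l)%D==0)):
--                 if k!=0 or l!=0:
--                     my_set1.add((k,l))
--     '''
--     Calculate S2, where S2 is the element which makes the second brackets non zero.
--     '''
--     my_set3=set()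
--     for k in range(D):
--         for l in range(D):
--             r=beta*k+2*gamma*l
--             v=-2*alpha*k-beta*l
--             r=r%D
--             v=v%D
--             if r!=0 or v!=0:
--                 my_set2.add((r,v))
--     '''
--     Calculate S3, where S3 is the element which makes the off diagonal elements non zero.
--     '''
--     for k in range(D):
--         for l in range(D):
--             if(((2*gamma*l+beta*k+k)%D==0) and ((2*alpha*k+beta*l-l)%D==0)):
--                 if k!=0 or l!=0:
--                     my_set3.add((k,l))
--     return my_set1, my_set2, my_set3
-- ===== SOURCE B (Python) =====
-- def klrv(D, alpha, beta, gamma):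
--     # Hash-index approach: index every l by its residue pair once, then for each k
--     # the matching l's for S1 and S3 are direct dictionary lookups (no inner scan);
--     # S2 walks each row's residue trajectory incrementally by adding the constant
--     # step (2*gamma, -beta) mod D instead of recomputing products per cell.
--     idx1 = {}
--     idx3 = {}
--     for l in range(D):
--         idx1.setdefault(((beta * l) % D, (2 * gamma * l) % D), []).append(l)
--         idx3.setdefault(((2 * gamma * l) % D, ((beta - 1) * l) % D), []).append(l)
--     s1 = set()
--     s3 = set()
--     for k in range(D):
--         for l in idx1.get(((-2 * alpha * k) % D, ((-beta) * k) % D), []):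
--             if k != 0 or l != 0:
--                 s1.add((k, l))
--         for l in idx3.get((((-(beta + 1)) * k) % D, ((-2 * alpha) * k) % D), []):
--             if k != 0 or l != 0:
--                 s3.add((k, l))
--     s2 = set()
--     for k in range(D):
--         dg = (2 * gamma) % D
--         db = beta % D
--         r = (beta * k) % D
--         v = ((-2 * alpha) * k) % D
--         for _ in range(D):
--             if r != 0 or v != 0:
--                 s2.add((r, v))
--             r = (r + dg) % D
--             v = (v - db) % D
--     return s1, s2, s3
-- ===== Notes on version B (the rewrite author's own statement) =====
-- stated objective: alternative
-- what changed: S1 and S3 are computed by building a hash index from each l to its residue pair once and then doing a single dictionary lookup per k (the inner scan over l disappears), and S2 is computed by walking each row's residue trajectory with constant incremental steps (r,v) += (2*gamma,-beta) mod D instead of recomputing the products per cell.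
import Mathlib
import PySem

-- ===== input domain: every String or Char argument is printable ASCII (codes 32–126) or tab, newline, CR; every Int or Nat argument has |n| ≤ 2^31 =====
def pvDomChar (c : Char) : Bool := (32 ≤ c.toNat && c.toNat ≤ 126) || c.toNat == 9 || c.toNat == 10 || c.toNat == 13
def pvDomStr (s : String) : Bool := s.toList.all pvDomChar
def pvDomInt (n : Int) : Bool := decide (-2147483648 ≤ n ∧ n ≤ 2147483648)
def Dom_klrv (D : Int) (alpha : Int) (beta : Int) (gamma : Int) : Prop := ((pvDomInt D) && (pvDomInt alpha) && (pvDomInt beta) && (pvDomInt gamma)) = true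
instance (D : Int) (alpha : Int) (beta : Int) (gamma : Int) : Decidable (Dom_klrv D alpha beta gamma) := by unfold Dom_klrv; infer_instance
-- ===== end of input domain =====

-- B replaces A's inner scans: S1/S3 use a residue-pair index built once (a dictionary lookup per k instead of an inner scan of all l), and S2 walks each row's residue trajectory by incremental steps; same three set lists, alternative algorithm.


-- ===== PORT A =====
def klrv (D : Int) (alpha : Int) (beta : Int) (gamma : Int) : (List (Int × Int)) × (List (Int × Int)) × (List (Int × Int)) :=
  let R := PySem.List.pyRange 0 D 1
  let s1 := R.foldl (fun s k => R.foldl (fun s l =>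
      if PySem.Int.mod (2*alpha*k + beta*l) D = 0 ∧ PySem.Int.mod (beta*k + 2*gamma*l) D = 0 then
        (if k ≠ 0 ∨ l ≠ 0 then PySem.Set.add s (k, l) else s)
      else s) s) PySem.Set.empty
  let s2 := R.foldl (fun s k => R.foldl (fun s l =>
      let r := beta*k + 2*gamma*l
      let v := -2*alpha*k - beta*l
      let r := PySem.Int.mod r D
      let v := PySem.Int.mod v D
      if r ≠ 0 ∨ v ≠ 0 then PySem.Set.add s (r, v) else s) s) PySem.Set.empty
  let s3 := R.foldl (fun s k => R.foldl (fun s l =>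
      if PySem.Int.mod (2*gamma*l + beta*k + k) D = 0 ∧ PySem.Int.mod (2*alpha*k + beta*l - l) D = 0 then
        (if k ≠ 0 ∨ l ≠ 0 then PySem.Set.add s (k, l) else s)
      else s) s) PySem.Set.empty
  (s1, s2, s3)

-- ===== PORT B =====
def klrv_alt (D : Int) (alpha : Int) (beta : Int) (gamma : Int) : (List (Int × Int)) × (List (Int × Int)) × (List (Int × Int)) :=
  let R := PySem.List.pyRange 0 D 1
  -- index every l by its residue pair, one pass (setdefault(key, []).append(l) = modify key [] (· ++ [l]))
  let idxs := R.foldl (fun (d : (PySem.Dict (Int × Int) (List Int)) × (PySem.Dict (Int × Int) (List Int))) l =>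
      (d.1.modify (PySem.Int.mod (beta*l) D, PySem.Int.mod (2*gamma*l) D) [] (· ++ [l]),
       d.2.modify (PySem.Int.mod (2*gamma*l) D, PySem.Int.mod ((beta-1)*l) D) [] (· ++ [l]))) (PySem.Dict.empty, PySem.Dict.empty)
  let idx1 := idxs.1
  let idx3 := idxs.2
  -- S1/S3: per k, a direct lookup of the matching l's
  let s13 := R.foldl (fun (s : (List (Int × Int)) × (List (Int × Int))) k =>
      ((idx1.getD (PySem.Int.mod (-2*alpha*k) D, PySem.Int.mod ((-beta)*k) D) []).foldl
          (fun s1 l => if k ≠ 0 ∨ l ≠ 0 then PySem.Set.add s1 (k, l) else s1) s.1,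
       (idx3.getD (PySem.Int.mod ((-(beta+1))*k) D, PySem.Int.mod ((-2*alpha)*k) D) []).foldl
          (fun s3 l => if k ≠ 0 ∨ l ≠ 0 then PySem.Set.add s3 (k, l) else s3) s.2)) (PySem.Set.empty, PySem.Set.empty)
  -- S2: walk each row's residue trajectory incrementally
  let s2 := R.foldl (fun s k =>
      let dg := PySem.Int.mod (2*gamma) D
      let db := PySem.Int.mod beta D
      (R.foldl (fun (t : (List (Int × Int)) × Int × Int) _ =>
          (if t.2.1 ≠ 0 ∨ t.2.2 ≠ 0 then PySem.Set.add t.1 (t.2.1, t.2.2) else t.1,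
           PySem.Int.mod (t.2.1 + dg) D, PySem.Int.mod (t.2.2 - db) D))
        (s, PySem.Int.mod (beta*k) D, PySem.Int.mod ((-2*alpha)*k) D)).1) PySem.Set.empty
  (s13.1, s2, s13.2)

-- ===== PRECONDITION & SPEC =====
def Spec_klrv (D : Int) (alpha : Int) (beta : Int) (gamma : Int) (out : (List (Int × Int)) × (List (Int × Int)) × (List (Int × Int))) : Prop := out = klrv_alt D alpha beta gamma
instance (D : Int) (alpha : Int) (beta : Int) (gamma : Int) (out : (List (Int × Int)) × (List (Int × Int)) × (List (Int × Int))) : Decidable (Spec_klrv D alpha beta gamma out) := by unfold Spec_klrv; infer_instance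

-- ===== CLAIM (what is proved, stated in full; the proofs are below) =====
def Claim_equal_klrv : Prop := ∀ (D : Int) (alpha : Int) (beta : Int) (gamma : Int), Dom_klrv D alpha beta gamma → Spec_klrv D alpha beta gamma (klrv D alpha beta gamma)

-- ===== LEMMAS AND PROOFS =====

-- (a + b) % D == 0 iff b and -a have the same residue (D > 0).
theorem mod_add_eq_zero_iff (a b D : Int) (hD : 0 < D) :
    PySem.Int.mod (a + b) D = 0 ↔ PySem.Int.mod b D = PySem.Int.mod (-a) D := by
  simp only [PySem.Int.mod_eq_emod_of_pos hD]
  rw [Int.emod_eq_emod_iff_emod_sub_eq_zero]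
  have h : b - -a = a + b := by ring
  rw [h]

-- reduced residues iterate (D > 0)
theorem mod_mod_add (x y D : Int) (hD : 0 < D) :
    PySem.Int.mod (PySem.Int.mod x D + PySem.Int.mod y D) D = PySem.Int.mod (x + y) D := by
  simp only [PySem.Int.mod_eq_emod_of_pos hD]
  exact (Int.add_emod x y D).symm

theorem mod_mod_sub (x y D : Int) (hD : 0 < D) :
    PySem.Int.mod (PySem.Int.mod x D - PySem.Int.mod y D) D = PySem.Int.mod (x - y) D := by
  simp only [PySem.Int.mod_eq_emod_of_pos hD]
  exact (Int.sub_emod x y D).symm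

-- the grouping index: looking up a residue pair returns exactly the l's carrying that key, in order
theorem getD_index (key : Int → (Int × Int)) (R : List Int) (c : Int × Int) :
    ((R.foldl (fun d l => d.modify (key l) [] (· ++ [l])) (PySem.Dict.empty : PySem.Dict (Int × Int) (List Int))).getD c [])
      = R.filter (fun l => key l == c) := by
  have h : R.foldl (fun d l => d.modify (key l) [] (· ++ [l])) (PySem.Dict.empty : PySem.Dict (Int × Int) (List Int))
      = (R.map (fun l => (key l, l))).foldl (fun d p => d.modify p.1 [] (· ++ [p.2])) PySem.Dict.empty := by
    rw [List.foldl_map]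
  rw [h, PySem.Dict.getD_foldl_modify_append, PySem.Dict.getD_empty]
  simp [List.filter_map, Function.comp_def, List.map_map]

-- A's S1 inner scan = B's index lookup (D > 0)
theorem pass1_inner (D alpha beta gamma k : Int) (hD : 0 < D) (s : List (Int × Int)) :
    (PySem.List.pyRange 0 D 1).foldl (fun s l =>
      if PySem.Int.mod (2*alpha*k + beta*l) D = 0 ∧ PySem.Int.mod (beta*k + 2*gamma*l) D = 0 then
        (if k ≠ 0 ∨ l ≠ 0 then PySem.Set.add s (k, l) else s)
      else s) s
    = (((PySem.List.pyRange 0 D 1).foldl (fun d l => d.modify (PySem.Int.mod (beta*l) D, PySem.Int.mod (2*gamma*l) D) [] (· ++ [l])) (PySem.Dict.empty : PySem.Dict (Int × Int) (List Int))).getD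
        (PySem.Int.mod (-2*alpha*k) D, PySem.Int.mod ((-beta)*k) D) []).foldl
        (fun s1 l => if k ≠ 0 ∨ l ≠ 0 then PySem.Set.add s1 (k, l) else s1) s := by
  rw [getD_index]
  have hstep : ∀ (acc : List (Int × Int)) (l : Int), l ∈ PySem.List.pyRange 0 D 1 →
      (if PySem.Int.mod (2*alpha*k + beta*l) D = 0 ∧ PySem.Int.mod (beta*k + 2*gamma*l) D = 0 then
        (if k ≠ 0 ∨ l ≠ 0 then PySem.Set.add acc (k, l) else acc)
      else acc)
      = (if (((PySem.Int.mod (beta*l) D, PySem.Int.mod (2*gamma*l) D) : Int × Int) == (PySem.Int.mod (-2*alpha*k) D, PySem.Int.mod ((-beta)*k) D)) then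
        (if k ≠ 0 ∨ l ≠ 0 then PySem.Set.add acc (k, l) else acc)
      else acc) := by
    intro acc l _
    have hcond : (PySem.Int.mod (2*alpha*k + beta*l) D = 0 ∧ PySem.Int.mod (beta*k + 2*gamma*l) D = 0)
        ↔ (((PySem.Int.mod (beta*l) D, PySem.Int.mod (2*gamma*l) D) : Int × Int) == (PySem.Int.mod (-2*alpha*k) D, PySem.Int.mod ((-beta)*k) D)) = true := by
      rw [beq_iff_eq, Prod.mk.injEq]
      constructor
      · rintro ⟨h1, h2⟩
        have e1 := (mod_add_eq_zero_iff (2*alpha*k) (beta*l) D hD).mp h1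
        have e2 := (mod_add_eq_zero_iff (beta*k) (2*gamma*l) D hD).mp h2
        refine ⟨?_, ?_⟩
        · rw [e1]; congr 1; ring
        · rw [e2]; congr 1; ring
      · rintro ⟨h1, h2⟩
        refine ⟨?_, ?_⟩
        · apply (mod_add_eq_zero_iff (2*alpha*k) (beta*l) D hD).mpr
          rw [h1]; congr 1; ring
        · apply (mod_add_eq_zero_iff (beta*k) (2*gamma*l) D hD).mpr
          rw [h2]; congr 1; ring
    rw [if_congr hcond rfl rfl]
  rw [PySem.List.foldl_congr_mem _ _ _ _ hstep, ← List.foldl_filter]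

-- A's S3 inner scan = B's index lookup (D > 0)
theorem pass3_inner (D alpha beta gamma k : Int) (hD : 0 < D) (s : List (Int × Int)) :
    (PySem.List.pyRange 0 D 1).foldl (fun s l =>
      if PySem.Int.mod (2*gamma*l + beta*k + k) D = 0 ∧ PySem.Int.mod (2*alpha*k + beta*l - l) D = 0 then
        (if k ≠ 0 ∨ l ≠ 0 then PySem.Set.add s (k, l) else s)
      else s) s
    = (((PySem.List.pyRange 0 D 1).foldl (fun d l => d.modify (PySem.Int.mod (2*gamma*l) D, PySem.Int.mod ((beta-1)*l) D) [] (· ++ [l])) (PySem.Dict.empty : PySem.Dict (Int × Int) (List Int))).getD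
        (PySem.Int.mod ((-(beta+1))*k) D, PySem.Int.mod ((-2*alpha)*k) D) []).foldl
        (fun s3 l => if k ≠ 0 ∨ l ≠ 0 then PySem.Set.add s3 (k, l) else s3) s := by
  rw [getD_index]
  have hstep : ∀ (acc : List (Int × Int)) (l : Int), l ∈ PySem.List.pyRange 0 D 1 →
      (if PySem.Int.mod (2*gamma*l + beta*k + k) D = 0 ∧ PySem.Int.mod (2*alpha*k + beta*l - l) D = 0 then
        (if k ≠ 0 ∨ l ≠ 0 then PySem.Set.add acc (k, l) else acc)
      else acc)
      = (if (((PySem.Int.mod (2*gamma*l) D, PySem.Int.mod ((beta-1)*l) D) : Int × Int) == (PySem.Int.mod ((-(beta+1))*k) D, PySem.Int.mod ((-2*alpha)*k) D)) then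
        (if k ≠ 0 ∨ l ≠ 0 then PySem.Set.add acc (k, l) else acc)
      else acc) := by
    intro acc l _
    have hcond : (PySem.Int.mod (2*gamma*l + beta*k + k) D = 0 ∧ PySem.Int.mod (2*alpha*k + beta*l - l) D = 0)
        ↔ (((PySem.Int.mod (2*gamma*l) D, PySem.Int.mod ((beta-1)*l) D) : Int × Int) == (PySem.Int.mod ((-(beta+1))*k) D, PySem.Int.mod ((-2*alpha)*k) D)) = true := by
      rw [beq_iff_eq, Prod.mk.injEq]
      have ha : PySem.Int.mod (2*gamma*l + beta*k + k) D = PySem.Int.mod ((beta+1)*k + 2*gamma*l) D := by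
        congr 1; ring
      have hb : PySem.Int.mod (2*alpha*k + beta*l - l) D = PySem.Int.mod (2*alpha*k + (beta-1)*l) D := by
        congr 1; ring
      rw [ha, hb]
      constructor
      · rintro ⟨h1, h2⟩
        have e1 := (mod_add_eq_zero_iff ((beta+1)*k) (2*gamma*l) D hD).mp h1
        have e2 := (mod_add_eq_zero_iff (2*alpha*k) ((beta-1)*l) D hD).mp h2
        refine ⟨?_, ?_⟩
        · rw [e1]; congr 1; ring
        · rw [e2]; congr 1; ring
      · rintro ⟨h1, h2⟩
        refine ⟨?_, ?_⟩
        · apply (mod_add_eq_zero_iff ((beta+1)*k) (2*gamma*l) D hD).mpr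
          rw [h1]; congr 1; ring
        · apply (mod_add_eq_zero_iff (2*alpha*k) ((beta-1)*l) D hD).mpr
          rw [h2]; congr 1; ring
    rw [if_congr hcond rfl rfl]
  rw [PySem.List.foldl_congr_mem _ _ _ _ hstep, ← List.foldl_filter]

-- B's incremental residue walk computes A's per-cell residues (D > 0)
theorem s2_inner (D alpha beta gamma k : Int) (hD : 0 < D) :
    ∀ (a b : Int) (s : List (Int × Int)),
    ((PySem.List.pyRange a b 1).foldl (fun (t : (List (Int × Int)) × Int × Int) _ =>
        (if t.2.1 ≠ 0 ∨ t.2.2 ≠ 0 then PySem.Set.add t.1 (t.2.1, t.2.2) else t.1,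
         PySem.Int.mod (t.2.1 + PySem.Int.mod (2*gamma) D) D,
         PySem.Int.mod (t.2.2 - PySem.Int.mod beta D) D))
      (s, PySem.Int.mod (beta*k + 2*gamma*a) D, PySem.Int.mod (-2*alpha*k - beta*a) D)).1
    = (PySem.List.pyRange a b 1).foldl (fun s l =>
        if PySem.Int.mod (beta*k + 2*gamma*l) D ≠ 0 ∨ PySem.Int.mod (-2*alpha*k - beta*l) D ≠ 0 then
          PySem.Set.add s (PySem.Int.mod (beta*k + 2*gamma*l) D, PySem.Int.mod (-2*alpha*k - beta*l) D)
        else s) s := by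
  intro a b
  by_cases hab : b ≤ a
  · intro s; rw [PySem.List.pyRange_one_eq_nil hab]; rfl
  · push Not at hab
    have hn : (b - a).toNat ≠ 0 := by omega
    generalize hN : (b - a).toNat = N at *
    induction N generalizing a with
    | zero => omega
    | succ n ih =>
      intro s
      rw [PySem.List.pyRange_one_cons hab]
      simp only [List.foldl_cons]
      have hr : PySem.Int.mod (PySem.Int.mod (beta*k + 2*gamma*a) D + PySem.Int.mod (2*gamma) D) D
          = PySem.Int.mod (beta*k + 2*gamma*(a+1)) D := by
        rw [mod_mod_add _ _ _ hD]; ring_nf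
      have hv : PySem.Int.mod (PySem.Int.mod (-2*alpha*k - beta*a) D - PySem.Int.mod beta D) D
          = PySem.Int.mod (-2*alpha*k - beta*(a+1)) D := by
        rw [mod_mod_sub _ _ _ hD]; ring_nf
      rw [hr, hv]
      by_cases hab2 : b ≤ a + 1
      · rw [PySem.List.pyRange_one_eq_nil hab2]; rfl
      · push Not at hab2
        exact ih (a+1) hab2 (by omega) (by omega) _

theorem klrv_eq_alt (D alpha beta gamma : Int) :
    klrv D alpha beta gamma = klrv_alt D alpha beta gamma := by
  by_cases hD : 0 < D
  · simp only [klrv, klrv_alt]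
    rw [PySem.List.foldl_prod_mk
        (f := fun (d : PySem.Dict (Int × Int) (List Int)) l => d.modify (PySem.Int.mod (beta*l) D, PySem.Int.mod (2*gamma*l) D) [] (· ++ [l]))
        (g := fun (d : PySem.Dict (Int × Int) (List Int)) l => d.modify (PySem.Int.mod (2*gamma*l) D, PySem.Int.mod ((beta-1)*l) D) [] (· ++ [l]))]
    rw [PySem.List.foldl_prod_mk
        (f := fun (s1 : List (Int × Int)) k => (((PySem.List.pyRange 0 D 1).foldl (fun d l => d.modify (PySem.Int.mod (beta*l) D, PySem.Int.mod (2*gamma*l) D) [] (· ++ [l])) (PySem.Dict.empty : PySem.Dict (Int × Int) (List Int))).getD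
            (PySem.Int.mod (-2*alpha*k) D, PySem.Int.mod ((-beta)*k) D) []).foldl
            (fun s1 l => if k ≠ 0 ∨ l ≠ 0 then PySem.Set.add s1 (k, l) else s1) s1)
        (g := fun (s3 : List (Int × Int)) k => (((PySem.List.pyRange 0 D 1).foldl (fun d l => d.modify (PySem.Int.mod (2*gamma*l) D, PySem.Int.mod ((beta-1)*l) D) [] (· ++ [l])) (PySem.Dict.empty : PySem.Dict (Int × Int) (List Int))).getD
            (PySem.Int.mod ((-(beta+1))*k) D, PySem.Int.mod ((-2*alpha)*k) D) []).foldl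
            (fun s3 l => if k ≠ 0 ∨ l ≠ 0 then PySem.Set.add s3 (k, l) else s3) s3)]
    simp only [Prod.mk.injEq]
    refine ⟨?_, ?_, ?_⟩
    · exact PySem.List.foldl_congr_mem _ _ _ _ (fun s k hk =>
        pass1_inner D alpha beta gamma k hD s)
    · apply PySem.List.foldl_congr_mem
      intro s k _
      have h0 := s2_inner D alpha beta gamma k hD 0 D s
      have hinit1 : PySem.Int.mod (beta*k + 2*gamma*0) D = PySem.Int.mod (beta*k) D := by
        congr 1; ring
      have hinit2 : PySem.Int.mod (-2*alpha*k - beta*0) D = PySem.Int.mod ((-2*alpha)*k) D := by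
        congr 1; ring
      rw [hinit1, hinit2] at h0
      exact h0.symm
    · exact PySem.List.foldl_congr_mem _ _ _ _ (fun s k hk =>
        pass3_inner D alpha beta gamma k hD s)
  · have hnil : PySem.List.pyRange 0 D 1 = [] := PySem.List.pyRange_one_eq_nil (by omega)
    simp only [klrv, klrv_alt, hnil]
    rfl

-- ===== VERDICT (by name: the statement is the Claim_ definition above) =====
theorem klrv_spec : Claim_equal_klrv := by
  intro D alpha beta gamma _
  show klrv D alpha beta gamma = klrv_alt D alpha beta gamma
  exact klrv_eq_alt D alpha beta gamma
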